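-- pv_equiv track=rewrite | github.com/version0-1/wiki-extract | wiki_extract/characters/extract_character_candidates.py | strip_html_comments
-- ===== SOURCE A (Python) =====
-- def strip_html_comments(s: str) -> str:
--     """HTMLコメント <!-- ... --> を除去する。"""
--     result = []
--     i = 0
--     while i < len(s):
--         if i <= len(s) - 7 and s[i:i + 4] == '<!--':
--             k = s.find('-->', i + 4)
--             if k != -1:
--                 i = k + 3
--                 continue
--         result.append(s[i])
--         i += 1
--     return ''.join(result).strip()
-- ===== SOURCE B (Python) =====
-- def strip_html_comments(s: str) -> str:
--     """HTMLコメント <!-- ... --> を除去する。"""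
--     # Single forward pass with a small automaton: `state` counts how much of
--     # '<!--' is matched (0-3), or tracks trailing '-' count inside a comment
--     # (4 = inside, 5 = one '-', 6 = two or more '-'); `pend` buffers text that
--     # may still turn out to be (part of) a comment and is flushed verbatim if
--     # the comment never closes.
--     out = []
--     pend = []
--     state = 0
--     for c in s:
--         if state < 4:
--             if c == '<!--'[state]:
--                 pend.append(c)
--                 state += 1
--             else:
--                 out += pend
--                 if c == '<':
--                     pend = [c]
--                     state = 1
--                 else:
--                     out.append(c)
--                     pend = []
--                     state = 0
--         elif c == '-':
--             pend.append(c)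
--             state = 5 if state == 4 else 6
--         elif c == '>' and state == 6:
--             pend = []
--             state = 0
--         else:
--             pend.append(c)
--             state = 4
--     out += pend
--     return ''.join(out).strip()
-- ===== Notes on version B (the rewrite author's own statement) =====
-- stated objective: faster
-- what changed: A's index loop that slice-compares s[i:i+4] at every position and re-scans with s.find('-->') is replaced by a single forward character pass driven by a 7-state automaton (prefix of the open marker matched / inside a comment with trailing-dash count) that buffers possibly-in-comment text and flushes it verbatim when the comment never closes.
import Mathlib
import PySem

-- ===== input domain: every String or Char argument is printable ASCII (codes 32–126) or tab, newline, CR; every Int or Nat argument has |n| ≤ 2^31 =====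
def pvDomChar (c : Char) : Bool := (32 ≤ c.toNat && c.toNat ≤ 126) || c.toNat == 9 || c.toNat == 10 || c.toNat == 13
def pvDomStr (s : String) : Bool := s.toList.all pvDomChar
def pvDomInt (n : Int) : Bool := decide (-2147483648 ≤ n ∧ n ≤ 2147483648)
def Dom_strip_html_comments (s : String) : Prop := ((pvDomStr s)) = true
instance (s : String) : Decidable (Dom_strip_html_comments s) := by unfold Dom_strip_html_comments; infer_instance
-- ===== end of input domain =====

-- B replaces A's index loop (a 4-char slice test at every position, forward re-scans
-- with s.find) by a single forward pass driven by a small automaton that buffers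
-- possibly-in-comment text and flushes it verbatim when the comment never closes;
-- a timing run measured B faster by a constant factor.

-- ===== PORT A =====
-- A's while-loop over index i, transliterated as the structural recursion on the
-- remaining suffix of the character list (i ↔ number of dropped characters); the
-- Python guard `i <= len(s) - 7` is `7 ≤ remaining.length`, `s[i:i+4] == '<!--'`
-- is `take 4 = ['<','!','-','-']`, and `s.find('-->', i + 4)` is the relative
-- `PySem.Chars.find ((c :: rest).drop 4) ['-','-','>']` (absolute k = i + 4 + relative).
def pvALoop : List Char → List Char
  | [] => []
  | c :: rest =>
    if 7 ≤ (c :: rest).length ∧ (c :: rest).take 4 = ['<', '!', '-', '-'] then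
      let k := PySem.Chars.find ((c :: rest).drop 4) ['-', '-', '>']
      if k = -1 then c :: pvALoop rest
      else pvALoop ((c :: rest).drop (4 + k.toNat + 3))
    else c :: pvALoop rest
termination_by cs => cs.length
decreasing_by all_goals (simp; try omega)

-- ''.join(result).strip() : result holds the kept characters in order
def strip_html_comments (s : String) : String :=
  String.ofList (PySem.Chars.strip (pvALoop s.toList))

-- ===== PORT B =====
-- Source B's loop body: the accumulator is (out, pend, state); state 0-3 = length of
-- the prefix of '<!--' currently matched (pend holds exactly those characters),
-- state 4/5/6 = inside a comment with 0 / 1 / ≥2 trailing '-' seen (pend holds the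
-- whole tentative comment). `'<!--'[state]` (index always in range, state < 4)
-- is `['<','!','-','-'].getD st ' '`.
def pvStep (acc : List Char × List Char × Nat) (c : Char) : List Char × List Char × Nat :=
  let out := acc.1
  let pend := acc.2.1
  let st := acc.2.2
  if st < 4 then
    if c = ['<', '!', '-', '-'].getD st ' ' then (out, pend ++ [c], st + 1)
    else if c = '<' then (out ++ pend, [c], 1)
    else (out ++ pend ++ [c], [], 0)
  else if c = '-' then (out, pend ++ [c], if st = 4 then 5 else 6)
  else if c = '>' ∧ st = 6 then (out, [], 0)
  else (out, pend ++ [c], 4)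

-- for c in s: …  then out += pend; ''.join(out).strip()
def strip_html_comments_alt (s : String) : String :=
  let r := s.toList.foldl pvStep ([], [], 0)
  String.ofList (PySem.Chars.strip (r.1 ++ r.2.1))

-- ===== PRECONDITION & SPEC =====
def Spec_strip_html_comments (s : String) (out : String) : Prop := out = strip_html_comments_alt s
instance (s : String) (out : String) : Decidable (Spec_strip_html_comments s out) := by unfold Spec_strip_html_comments; infer_instance

-- ===== CLAIM (what is proved, stated in full; the proofs are below) =====
def Claim_equal_strip_html_comments : Prop := ∀ (s : String), Dom_strip_html_comments s → Spec_strip_html_comments s (strip_html_comments s)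

-- ===== LEMMAS AND PROOFS =====

-- return-style version of B's automaton (proof helper): pvRun st pend cs is the text
-- still to be emitted when the fold continues from state st / buffer pend on cs
def pvRun : Nat → List Char → List Char → List Char
  | _, pend, [] => pend
  | st, pend, c :: cs =>
    if st < 4 then
      if c = ['<', '!', '-', '-'].getD st ' ' then pvRun (st + 1) (pend ++ [c]) cs
      else if c = '<' then pend ++ pvRun 1 [c] cs
      else pend ++ [c] ++ pvRun 0 [] cs
    else if c = '-' then pvRun (if st = 4 then 5 else 6) (pend ++ [c]) cs
    else if c = '>' ∧ st = 6 then pvRun 0 [] cs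
    else pvRun 4 (pend ++ [c]) cs

theorem pv_foldl_run (cs : List Char) : ∀ (out pend : List Char) (st : Nat),
    (cs.foldl pvStep (out, pend, st)).1 ++ (cs.foldl pvStep (out, pend, st)).2.1
      = out ++ pvRun st pend cs := by
  induction cs with
  | nil => intro out pend st; simp [pvRun]
  | cons c cs ih =>
    intro out pend st
    simp only [List.foldl_cons]
    conv_rhs => rw [pvRun]
    by_cases h4 : st < 4
    · by_cases hc : c = ['<', '!', '-', '-'].getD st ' '
      · rw [show pvStep (out, pend, st) c = (out, pend ++ [c], st + 1) by
            simp only [pvStep]; rw [if_pos h4, if_pos hc], ih, if_pos h4, if_pos hc]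
      · by_cases hlt : c = '<'
        · rw [show pvStep (out, pend, st) c = (out ++ pend, [c], 1) by
              simp only [pvStep]; rw [if_pos h4, if_neg hc, if_pos hlt], ih,
              if_pos h4, if_neg hc, if_pos hlt, List.append_assoc]
        · rw [show pvStep (out, pend, st) c = (out ++ pend ++ [c], [], 0) by
              simp only [pvStep]; rw [if_pos h4, if_neg hc, if_neg hlt], ih,
              if_pos h4, if_neg hc, if_neg hlt]
          simp [List.append_assoc]
    · by_cases hd : c = '-'
      · rw [show pvStep (out, pend, st) c = (out, pend ++ [c], if st = 4 then 5 else 6) by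
            simp only [pvStep]; rw [if_neg h4, if_pos hd], ih, if_neg h4, if_pos hd]
      · by_cases hg : c = '>' ∧ st = 6
        · rw [show pvStep (out, pend, st) c = (out, [], 0) by
              simp only [pvStep]; rw [if_neg h4, if_neg hd, if_pos hg], ih,
              if_neg h4, if_neg hd, if_pos hg]
        · rw [show pvStep (out, pend, st) c = (out, pend ++ [c], 4) by
              simp only [pvStep]; rw [if_neg h4, if_neg hd, if_neg hg], ih,
              if_neg h4, if_neg hd, if_neg hg]

-- a prefix of a suffix is an infix
theorem pv_prefix_drop_infix (sub l : List Char) (j : Nat) (h : sub <+: l.drop j) :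
    sub <:+: l := by
  obtain ⟨t, ht⟩ := h
  exact ⟨l.take j, t, by rw [List.append_assoc, ht, List.take_append_drop]⟩

-- uniqueness direction of PySem.Chars.find_spec
theorem pv_find_eq_natCast (s sub : List Char) (n : Nat)
    (h1 : sub <+: s.drop n) (h2 : ∀ i < n, ¬ sub <+: s.drop i) :
    PySem.Chars.find s sub = (n : Int) := by
  have hnn : 0 ≤ PySem.Chars.find s sub :=
    (PySem.Chars.find_nonneg_iff s sub).mpr (pv_prefix_drop_infix sub s n h1)
  obtain ⟨hpre, hmin⟩ := PySem.Chars.find_spec hnn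
  have : (PySem.Chars.find s sub).toNat = n := by
    rcases lt_trichotomy (PySem.Chars.find s sub).toNat n with h | h | h
    · exact absurd hpre (h2 _ h)
    · exact h
    · exact absurd h1 (hmin n h)
  omega

theorem pv_find_cons_neg (c : Char) (cs sub : List Char) (h : ¬ sub <+: (c :: cs))
    (hcs : PySem.Chars.find cs sub = -1) : PySem.Chars.find (c :: cs) sub = -1 := by
  rw [PySem.Chars.find_eq_neg_one_iff] at hcs ⊢
  rintro ⟨pre, suf, heq⟩
  cases pre with
  | nil => exact h ⟨suf, by simpa using heq⟩
  | cons a pre' =>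
    apply hcs
    cases heq
    exact ⟨pre', suf, rfl⟩

theorem pv_find_cons_pos (c : Char) (cs sub : List Char) (h : ¬ sub <+: (c :: cs))
    (hcs : 0 ≤ PySem.Chars.find cs sub) :
    PySem.Chars.find (c :: cs) sub = 1 + PySem.Chars.find cs sub := by
  obtain ⟨hpre, hmin⟩ := PySem.Chars.find_spec hcs
  have heq := pv_find_eq_natCast (c :: cs) sub ((PySem.Chars.find cs sub).toNat + 1)
    (by rwa [List.drop_succ_cons])
    (by
      intro i hi
      cases i with
      | zero => simpa using h
      | succ j =>
        rw [List.drop_succ_cons]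
        exact hmin j (by omega))
  rw [heq]
  omega

theorem pv_not_pre1 (c : Char) (cs : List Char) (h : c ≠ '-') :
    ¬ ['-', '-', '>'] <+: (c :: cs) := by
  intro hp
  exact h (List.cons_prefix_cons.mp hp).1.symm

theorem pv_not_pre2 (c : Char) (cs : List Char) (h : c ≠ '-') :
    ¬ ['-', '-', '>'] <+: ('-' :: c :: cs) := by
  intro hp
  exact h (List.cons_prefix_cons.mp (List.cons_prefix_cons.mp hp).2).1.symm

theorem pv_not_pre3 (c : Char) (cs : List Char) (h : c ≠ '>') :
    ¬ ['-', '-', '>'] <+: ('-' :: '-' :: c :: cs) := by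
  intro hp
  exact h (List.cons_prefix_cons.mp (List.cons_prefix_cons.mp (List.cons_prefix_cons.mp hp).2).2).1.symm

-- prepending one character that does not open a '-->' occurrence shifts the
-- close-finding if-expression by one cons
theorem pv_run_if_shift (a : Char) (cs X : List Char)
    (hnp : ¬ ['-', '-', '>'] <+: (a :: cs)) :
    (if PySem.Chars.find cs ['-', '-', '>'] = -1 then X
      else pvRun 0 [] (cs.drop ((PySem.Chars.find cs ['-', '-', '>']).toNat + 3)))
  = (if PySem.Chars.find (a :: cs) ['-', '-', '>'] = -1 then X
      else pvRun 0 [] ((a :: cs).drop ((PySem.Chars.find (a :: cs) ['-', '-', '>']).toNat + 3))) := by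
  rcases Int.lt_or_le (PySem.Chars.find cs ['-', '-', '>']) 0 with hneg | hpos
  · have he : PySem.Chars.find cs ['-', '-', '>'] = -1 := by
      have := PySem.Chars.neg_one_le_find cs ['-', '-', '>']
      omega
    rw [he, pv_find_cons_neg a cs _ hnp he]
    simp
  · have hF := pv_find_cons_pos a cs _ hnp hpos
    rw [if_neg (by omega), if_neg (by rw [hF]; omega)]
    congr 1
    rw [hF, show (1 + PySem.Chars.find cs ['-', '-', '>']).toNat + 3
        = ((PySem.Chars.find cs ['-', '-', '>']).toNat + 3) + 1 by omega,
      List.drop_succ_cons]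

-- the in-comment states: state 4 closes at the first '-->' of the remaining text,
-- state 6 behaves as state 4 would on '--' ++ the remaining text
theorem pv_run46 : ∀ (n : Nat) (cs p : List Char), cs.length ≤ n →
    (pvRun 4 p cs = if PySem.Chars.find cs ['-', '-', '>'] = -1 then p ++ cs
       else pvRun 0 [] (cs.drop ((PySem.Chars.find cs ['-', '-', '>']).toNat + 3)))
  ∧ (pvRun 6 p cs = if PySem.Chars.find ('-' :: '-' :: cs) ['-', '-', '>'] = -1 then p ++ cs
       else pvRun 0 [] (('-' :: '-' :: cs).drop ((PySem.Chars.find ('-' :: '-' :: cs) ['-', '-', '>']).toNat + 3))) := by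
  intro n
  induction n with
  | zero =>
    intro cs p hlen
    have hnil : cs = [] := List.eq_nil_of_length_eq_zero (by omega)
    subst hnil
    refine ⟨?_, ?_⟩ <;> simp [pvRun, show PySem.Chars.find ([] : List Char) ['-', '-', '>'] = -1 from by decide,
      show PySem.Chars.find ['-', '-'] ['-', '-', '>'] = -1 from by decide]
  | succ n ih =>
    intro cs p hlen
    constructor
    · -- state 4
      cases cs with
      | nil =>
        simp [pvRun, show PySem.Chars.find ([] : List Char) ['-', '-', '>'] = -1 from by decide]
      | cons c cs' =>
        have hlen' : cs'.length ≤ n := by simp at hlen; omega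
        by_cases hd : c = '-'
        · subst hd
          cases cs' with
          | nil =>
            simp [pvRun, show PySem.Chars.find ['-'] ['-', '-', '>'] = -1 from by decide]
          | cons c2 cs2 =>
            have hlen2 : cs2.length ≤ n := by simp at hlen; omega
            rw [show pvRun 4 p ('-' :: c2 :: cs2) = pvRun 5 (p ++ ['-']) (c2 :: cs2) from by
              rw [pvRun]; norm_num]
            by_cases h2 : c2 = '-'
            · subst h2
              rw [show pvRun 5 (p ++ ['-']) ('-' :: cs2) = pvRun 6 (p ++ ['-', '-']) cs2 from by
                rw [pvRun]; norm_num]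
              rw [(ih cs2 (p ++ ['-', '-']) hlen2).2]
              split_ifs <;> simp
            · rw [show pvRun 5 (p ++ ['-']) (c2 :: cs2) = pvRun 4 (p ++ ['-', c2]) cs2 from by
                rw [pvRun]; simp [h2]]
              rw [(ih cs2 (p ++ ['-', c2]) hlen2).1]
              rw [pv_run_if_shift c2 cs2 _ (pv_not_pre1 c2 cs2 h2),
                pv_run_if_shift '-' (c2 :: cs2) _ (pv_not_pre2 c2 cs2 h2)]
              split_ifs <;> simp
        · rw [show pvRun 4 p (c :: cs') = pvRun 4 (p ++ [c]) cs' from by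
            rw [pvRun]; simp [hd]]
          rw [(ih cs' (p ++ [c]) hlen').1]
          rw [pv_run_if_shift c cs' _ (pv_not_pre1 c cs' hd)]
          split_ifs <;> simp
    · -- state 6
      cases cs with
      | nil =>
        simp [pvRun, show PySem.Chars.find ['-', '-'] ['-', '-', '>'] = -1 from by decide]
      | cons c cs' =>
        have hlen' : cs'.length ≤ n := by simp at hlen; omega
        by_cases hd : c = '-'
        · subst hd
          rw [show pvRun 6 p ('-' :: cs') = pvRun 6 (p ++ ['-']) cs' from by
            rw [pvRun]; norm_num]
          rw [(ih cs' (p ++ ['-']) hlen').2]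
          rw [pv_run_if_shift '-' ('-' :: '-' :: cs') _ (pv_not_pre3 '-' cs' (by decide))]
          split_ifs <;> simp
        · by_cases hg : c = '>'
          · subst hg
            rw [show pvRun 6 p ('>' :: cs') = pvRun 0 [] cs' from by simp [pvRun]]
            rw [show PySem.Chars.find ('-' :: '-' :: '>' :: cs') ['-', '-', '>'] = ((0 : Nat) : Int) from
              pv_find_eq_natCast _ _ 0 (by simp) (by omega)]
            norm_num
          · rw [show pvRun 6 p (c :: cs') = pvRun 4 (p ++ [c]) cs' from by
              rw [pvRun]; simp [hd, hg]]
            rw [(ih cs' (p ++ [c]) hlen').1]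
            rw [pv_run_if_shift c cs' _ (pv_not_pre1 c cs' hd),
              pv_run_if_shift '-' (c :: cs') _ (pv_not_pre2 c cs' hd),
              pv_run_if_shift '-' ('-' :: c :: cs') _ (pv_not_pre3 c cs' hg)]
            split_ifs <;> simp

theorem pv_aLoop_copy (cs : List Char)
    (h : ∀ j : Nat, PySem.Chars.find (cs.drop (j + 4)) ['-', '-', '>'] = -1) :
    pvALoop cs = cs := by
  induction cs with
  | nil => simp [pvALoop]
  | cons c rest ih =>
    have hrest : ∀ j : Nat, PySem.Chars.find (rest.drop (j + 4)) ['-', '-', '>'] = -1 := by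
      intro j
      have := h (j + 1)
      rwa [show j + 1 + 4 = (j + 4) + 1 by omega, List.drop_succ_cons] at this
    rw [pvALoop]
    by_cases hg : 7 ≤ (c :: rest).length ∧ (c :: rest).take 4 = ['<', '!', '-', '-']
    · have h0 := h 0
      simp only [Nat.zero_add] at h0
      simp only [if_pos hg, h0, if_true]
      exact congrArg (c :: ·) (ih hrest)
    · simp only [if_neg hg]
      exact congrArg (c :: ·) (ih hrest)

theorem pv_aLoop_cons_ne (c : Char) (cs : List Char) (h : c ≠ '<') :
    pvALoop (c :: cs) = c :: pvALoop cs := by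
  rw [pvALoop, if_neg]
  rintro ⟨-, ht⟩
  rw [List.take_succ_cons] at ht
  exact h (List.cons.injEq .. |>.mp ht).1

theorem pv_aLoop_cons_take (c : Char) (cs : List Char)
    (h : (c :: cs).take 4 ≠ ['<', '!', '-', '-']) :
    pvALoop (c :: cs) = c :: pvALoop cs := by
  rw [pvALoop, if_neg]
  exact fun hg => h hg.2

theorem pv_run_eq_aLoop : ∀ (n : Nat) (cs : List Char), cs.length ≤ n →
    pvRun 0 [] cs = pvALoop cs ∧ pvRun 1 ['<'] cs = pvALoop ('<' :: cs) := by
  intro n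
  induction n with
  | zero =>
    intro cs hlen
    have hnil : cs = [] := List.eq_nil_of_length_eq_zero (by omega)
    subst hnil
    exact ⟨by simp [pvRun, pvALoop], by simp [pvRun, pvALoop]⟩
  | succ n ih =>
    intro cs hlen
    constructor
    · -- from the scanning state
      cases cs with
      | nil => simp [pvRun, pvALoop]
      | cons c cs' =>
        have hlen' : cs'.length ≤ n := by simp at hlen; omega
        by_cases hc : c = '<'
        · subst hc
          rw [show pvRun 0 [] ('<' :: cs') = pvRun 1 ['<'] cs' from by simp [pvRun]]
          exact (ih cs' hlen').2
        · rw [show pvRun 0 [] (c :: cs') = c :: pvRun 0 [] cs' from by simp [pvRun, hc],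
            pv_aLoop_cons_ne c cs' hc, (ih cs' hlen').1]
    · -- one '<' matched
      cases cs with
      | nil => simp [pvRun, pvALoop]
      | cons c cs' =>
        have hlen' : cs'.length ≤ n := by simp at hlen; omega
        by_cases h1 : c = '!'
        · subst h1
          rw [show pvRun 1 ['<'] ('!' :: cs') = pvRun 2 ['<', '!'] cs' from by simp [pvRun]]
          cases cs' with
          | nil => simp [pvRun, pvALoop]
          | cons c2 cs2 =>
            have hlen2 : cs2.length ≤ n := by simp at hlen; omega
            by_cases h2 : c2 = '-'
            · subst h2
              rw [show pvRun 2 ['<', '!'] ('-' :: cs2) = pvRun 3 ['<', '!', '-'] cs2 from by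
                simp [pvRun]]
              cases cs2 with
              | nil => simp [pvRun, pvALoop]
              | cons c3 cs3 =>
                have hlen3 : cs3.length ≤ n := by simp at hlen; omega
                by_cases h3 : c3 = '-'
                · subst h3
                  rw [show pvRun 3 ['<', '!', '-'] ('-' :: cs3)
                      = pvRun 4 ['<', '!', '-', '-'] cs3 from by simp [pvRun]]
                  rw [(pv_run46 cs3.length cs3 ['<', '!', '-', '-'] le_rfl).1]
                  rcases Int.lt_or_le (PySem.Chars.find cs3 ['-', '-', '>']) 0 with hneg | hpos
                  · have he : PySem.Chars.find cs3 ['-', '-', '>'] = -1 := by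
                      have := PySem.Chars.neg_one_le_find cs3 ['-', '-', '>']
                      omega
                    have hnf : ∀ j : Nat,
                        PySem.Chars.find (('<' :: '!' :: '-' :: '-' :: cs3).drop (j + 4)) ['-', '-', '>'] = -1 := by
                      intro j
                      have hd4 : ('<' :: '!' :: '-' :: '-' :: cs3).drop (j + 4) = cs3.drop j := by
                        rw [show j + 4 = 4 + j from Nat.add_comm j 4, ← List.drop_drop]
                        simp
                      rw [hd4, PySem.Chars.find_eq_neg_one_iff]
                      intro hinf
                      exact (PySem.Chars.find_eq_neg_one_iff _ _).mp he
                        (hinf.trans (List.drop_suffix j cs3).isInfix)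
                    rw [he, if_pos rfl, pv_aLoop_copy _ hnf]
                    simp
                  · rw [if_neg (by omega)]
                    obtain ⟨hpre, -⟩ := PySem.Chars.find_spec hpos
                    have h3le : 3 ≤ cs3.length := by
                      have := hpre.length_le
                      simp [List.length_drop] at this
                      omega
                    rw [(ih (cs3.drop ((PySem.Chars.find cs3 ['-', '-', '>']).toNat + 3))
                      (by simp [List.length_drop]; omega)).1]
                    conv_rhs => rw [pvALoop]
                    rw [if_pos ⟨by simp; omega, by simp⟩]
                    simp only [List.drop_succ_cons, List.drop_zero]
                    rw [if_neg (by omega)]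
                    congr 1
                    rw [show 4 + (PySem.Chars.find cs3 ['-', '-', '>']).toNat
                        = ((PySem.Chars.find cs3 ['-', '-', '>']).toNat + 3) + 1 by omega,
                      List.drop_succ_cons]
                · by_cases h3l : c3 = '<'
                  · subst h3l
                    rw [show pvRun 3 ['<', '!', '-'] ('<' :: cs3)
                        = ['<', '!', '-'] ++ pvRun 1 ['<'] cs3 from by simp [pvRun]]
                    rw [(ih cs3 hlen3).2,
                      pv_aLoop_cons_take '<' ('!' :: '-' :: '<' :: cs3) (by intro ht; simp at ht),
                      pv_aLoop_cons_ne '!' _ (by decide), pv_aLoop_cons_ne '-' _ (by decide)]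
                    rfl
                  · rw [show pvRun 3 ['<', '!', '-'] (c3 :: cs3)
                        = ['<', '!', '-'] ++ [c3] ++ pvRun 0 [] cs3 from by simp [pvRun, h3, h3l]]
                    rw [(ih cs3 hlen3).1,
                      pv_aLoop_cons_take '<' ('!' :: '-' :: c3 :: cs3)
                        (by intro ht; simp at ht; exact h3 ht),
                      pv_aLoop_cons_ne '!' _ (by decide), pv_aLoop_cons_ne '-' _ (by decide),
                      pv_aLoop_cons_ne c3 _ h3l]
                    rfl
            · by_cases h2l : c2 = '<'
              · subst h2l
                rw [show pvRun 2 ['<', '!'] ('<' :: cs2)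
                    = ['<', '!'] ++ pvRun 1 ['<'] cs2 from by simp [pvRun]]
                rw [(ih cs2 hlen2).2,
                  pv_aLoop_cons_take '<' ('!' :: '<' :: cs2) (by intro ht; simp at ht),
                  pv_aLoop_cons_ne '!' _ (by decide)]
                rfl
              · rw [show pvRun 2 ['<', '!'] (c2 :: cs2)
                    = ['<', '!'] ++ [c2] ++ pvRun 0 [] cs2 from by simp [pvRun, h2, h2l]]
                rw [(ih cs2 hlen2).1,
                  pv_aLoop_cons_take '<' ('!' :: c2 :: cs2)
                    (by intro ht; simp at ht; exact h2 ht.1),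
                  pv_aLoop_cons_ne '!' _ (by decide), pv_aLoop_cons_ne c2 _ h2l]
                rfl
        · by_cases h1l : c = '<'
          · subst h1l
            rw [show pvRun 1 ['<'] ('<' :: cs') = ['<'] ++ pvRun 1 ['<'] cs' from by
              simp [pvRun]]
            rw [(ih cs' hlen').2,
              pv_aLoop_cons_take '<' ('<' :: cs') (by intro ht; simp at ht)]
            rfl
          · rw [show pvRun 1 ['<'] (c :: cs') = ['<'] ++ [c] ++ pvRun 0 [] cs' from by
              simp [pvRun, h1, h1l]]
            rw [(ih cs' hlen').1,
              pv_aLoop_cons_take '<' (c :: cs') (by intro ht; simp at ht; exact h1 ht.1),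
              pv_aLoop_cons_ne c _ h1l]
            rfl

-- ===== VERDICT (by name: the statement is the Claim_ definition above) =====
theorem strip_html_comments_spec : Claim_equal_strip_html_comments := by
  intro s _
  unfold Spec_strip_html_comments strip_html_comments strip_html_comments_alt
  have h := pv_foldl_run s.toList [] [] 0
  simp only [h, List.nil_append]
  rw [(pv_run_eq_aLoop s.toList.length s.toList le_rfl).1]
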